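-- pv_equiv track=rewrite | github.com/UnderTheBridgeCoding/OmegaParse | omega_parse/normalizers.py | _extract_field_case_insensitive
-- ===== SOURCE A (Python) =====
-- from typing import List, Optional, Any, Dict
--
-- def _extract_field_case_insensitive(
--
--     obj: Dict[str, str],
--     keys: List[str]
-- ) -> Optional[str]:
--     """
--     Extract a field from object trying multiple keys (case-insensitive).
--     """
--     obj_lower = {k.lower(): v for k, v in obj.items()}
--
--     for key in keys:
--         if key.lower() in obj_lower:
--             value = obj_lower[key.lower()]
--             if value:
--                 return str(value)
--     return None
-- ===== SOURCE B (Python) =====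
-- def _extract_field_case_insensitive(obj, keys):
--     # Inverted traversal: one pass over obj filling a slot per requested key,
--     # then a scan of the slots for the first truthy value.
--     slots = [[k.lower(), None] for k in keys]
--     for k, v in obj.items():
--         kl = k.lower()
--         for slot in slots:
--             if slot[0] == kl:
--                 slot[1] = v  # last occurrence wins, like dict rebuilding
--     for _, val in slots:
--         if val:
--             return str(val)
--     return None
-- ===== Notes on version B (the rewrite author's own statement) =====
-- stated objective: alternative
-- what changed: B inverts the traversal: instead of building a lowercased dict and looking keys up, it makes one pass over obj updating a per-requested-key slot array (last match wins), then scans the slots in key order for the first truthy value.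
import Mathlib
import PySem

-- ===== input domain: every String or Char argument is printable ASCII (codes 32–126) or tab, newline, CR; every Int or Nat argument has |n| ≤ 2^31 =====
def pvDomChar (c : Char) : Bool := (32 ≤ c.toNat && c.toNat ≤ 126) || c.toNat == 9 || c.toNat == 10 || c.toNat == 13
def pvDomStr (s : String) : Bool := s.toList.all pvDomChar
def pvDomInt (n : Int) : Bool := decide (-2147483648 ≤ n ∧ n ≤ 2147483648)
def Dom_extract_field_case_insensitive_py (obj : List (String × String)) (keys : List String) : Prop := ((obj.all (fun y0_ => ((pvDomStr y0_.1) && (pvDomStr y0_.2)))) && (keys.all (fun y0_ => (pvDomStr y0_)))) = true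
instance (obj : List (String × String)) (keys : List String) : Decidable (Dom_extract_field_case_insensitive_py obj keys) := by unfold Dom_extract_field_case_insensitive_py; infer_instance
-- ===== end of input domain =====

-- B inverts the traversal: one pass over obj filling a slot per requested key, then a scan of the slots (alternative decomposition, not claimed faster).

-- ===== PORT A =====
-- the `for key in keys` loop of A, given the prebuilt lowercased dict
def pvALoop (objLower : PySem.Dict String String) : List String → Option String
  | [] => none
  | key :: rest =>
    match objLower.get? (PySem.Str.lower key) with
    | some value => if value ≠ "" then some value else pvALoop objLower rest
    | none => pvALoop objLower rest

def extract_field_case_insensitive_py (obj : List (String × String)) (keys : List String) : Option String :=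
  let objLower := obj.foldl (fun d p => d.insert (PySem.Str.lower p.1) p.2) PySem.Dict.empty
  pvALoop objLower keys

-- ===== PORT B =====
-- update every slot whose target equals the lowered key of the incoming pair (Source B's inner `for slot in slots`)
def pvSlotStep (p : String × String) (slots : List (String × Option String)) : List (String × Option String) :=
  slots.map (fun s => if s.1 == PySem.Str.lower p.1 then (s.1, some p.2) else s)

-- final scan of the slots (Source B's `for _, val in slots`)
def pvPick : List (String × Option String) → Option String
  | [] => none
  | (_, v) :: rest =>
    match v with
    | some value => if value ≠ "" then some value else pvPick rest
    | none => pvPick rest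

def extract_field_case_insensitive_py_alt (obj : List (String × String)) (keys : List String) : Option String :=
  let slots0 := keys.map (fun k => (PySem.Str.lower k, (none : Option String)))
  pvPick (obj.foldl (fun slots p => pvSlotStep p slots) slots0)

-- ===== PRECONDITION & SPEC =====
def Spec_extract_field_case_insensitive_py (obj : List (String × String)) (keys : List String) (out : Option String) : Prop := out = extract_field_case_insensitive_py_alt obj keys
instance (obj : List (String × String)) (keys : List String) (out : Option String) : Decidable (Spec_extract_field_case_insensitive_py obj keys out) := by unfold Spec_extract_field_case_insensitive_py; infer_instance

-- ===== CLAIM (what is proved, stated in full; the proofs are below) =====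
def Claim_equal_extract_field_case_insensitive_py : Prop := ∀ (obj : List (String × String)) (keys : List String), Dom_extract_field_case_insensitive_py obj keys → Spec_extract_field_case_insensitive_py obj keys (extract_field_case_insensitive_py obj keys)

-- ===== LEMMAS AND PROOFS =====

-- folding an elementwise map over obj acts on each slot independently
theorem pvFold_map (obj : List (String × String)) (slots : List (String × Option String)) :
    obj.foldl (fun ss p => pvSlotStep p ss) slots
      = slots.map (fun s => obj.foldl (fun s p => if s.1 == PySem.Str.lower p.1 then (s.1, some p.2) else s) s) := by
  induction obj generalizing slots with
  | nil => simp
  | cons p rest ih =>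
    simp only [List.foldl_cons, ih]
    simp [pvSlotStep, List.map_map]

-- a single slot after the fold keeps its target and holds the last matching value of obj
theorem pvSlot_scan (obj : List (String × String)) (t : String) (v : Option String) :
    obj.foldl (fun s p => if s.1 == PySem.Str.lower p.1 then (s.1, some p.2) else s) (t, v)
      = (t, obj.foldl (fun w p => if PySem.Str.lower p.1 == t then some p.2 else w) v) := by
  induction obj generalizing v with
  | nil => rfl
  | cons p rest ih =>
    simp only [List.foldl_cons]
    by_cases h : PySem.Str.lower p.1 = t
    · simpa [h] using ih (some p.2)
    · simpa [h, Ne.symm h] using ih v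

-- lookup in the fold-built lowered dict = last-match scan of obj
theorem pvGet_fold_eq_scan (obj : List (String × String)) (d : PySem.Dict String String) (t : String) :
    (obj.foldl (fun d p => d.insert (PySem.Str.lower p.1) p.2) d).get? t
      = obj.foldl (fun found p => if PySem.Str.lower p.1 == t then some p.2 else found) (d.get? t) := by
  induction obj generalizing d with
  | nil => rfl
  | cons p rest ih =>
    simp only [List.foldl_cons, ih, PySem.Dict.get?_insert]
    by_cases h : PySem.Str.lower p.1 = t
    · simp [h]
    · simp [h, Ne.symm h]

-- A's key loop = picking from slots carrying the dict lookups
theorem pvALoop_pick (d : PySem.Dict String String) (keys : List String) :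
    pvALoop d keys = pvPick (keys.map (fun k => (PySem.Str.lower k, d.get? (PySem.Str.lower k)))) := by
  induction keys with
  | nil => rfl
  | cons key rest ih => simp only [pvALoop, pvPick, List.map_cons, ih]

-- ===== VERDICT (by name: the statement is the Claim_ definition above) =====
theorem extract_field_case_insensitive_py_spec : Claim_equal_extract_field_case_insensitive_py := by
  intro obj keys _
  unfold Spec_extract_field_case_insensitive_py extract_field_case_insensitive_py extract_field_case_insensitive_py_alt
  simp only [pvALoop_pick, pvFold_map, List.map_map]
  refine congrArg pvPick (List.map_congr_left fun k _ => ?_)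
  rw [Function.comp_apply, pvSlot_scan, pvGet_fold_eq_scan, PySem.Dict.get?_empty]
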